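-- pv_equiv track=rewrite | github.com/romandlcourcerccf/algo_trainning | 23_calculator/23.py | calc
-- ===== SOURCE A (Python) =====
-- def calc(N):
--     ops = 0
--
--     track = []
--     track.append(str(1))
--
--     if N == 1:
--         return ops, track
--
--     _N = 1
--     while _N <= N:
--
--         mult_3 = _N * 3
--         mult_2 = _N * 2
--         plus_1 = _N+1
--
--         res = [mult_3, mult_2, plus_1]
--         res = [r for r in res if r <= N]
--         res = max(res)
--
--         ops += 1
--         track.append(str(res))
--
--         if res == N:
--             return ops, track
--
--         _N = res
-- ===== SOURCE B (Python) =====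
-- def calc(N):
--     # Three explicit phases instead of a max-selecting loop: the greedy choice
--     # is x3 while it fits, then at most one x2, then +1 steps up to N.
--     track = [str(1)]
--     ops = 0
--     _N = 1
--     while _N * 3 <= N:
--         _N *= 3
--         ops += 1
--         track.append(str(_N))
--     if _N * 2 <= N:
--         _N *= 2
--         ops += 1
--         track.append(str(_N))
--     while _N < N:
--         _N += 1
--         ops += 1
--         track.append(str(_N))
--     return ops, track
-- ===== Notes on version B (the rewrite author's own statement) =====
-- stated objective: simpler
-- what changed: Replaced A's per-step build/filter/max candidate selection inside one loop by three explicit phases (multiply by 3 while it fits, at most one by-2 step, then +1 steps), so each step is plain arithmetic with no list construction or max() call.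
-- outside the precondition, e.g. on calc(0): A returns None, B returns (0, ['1'])
import Mathlib
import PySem

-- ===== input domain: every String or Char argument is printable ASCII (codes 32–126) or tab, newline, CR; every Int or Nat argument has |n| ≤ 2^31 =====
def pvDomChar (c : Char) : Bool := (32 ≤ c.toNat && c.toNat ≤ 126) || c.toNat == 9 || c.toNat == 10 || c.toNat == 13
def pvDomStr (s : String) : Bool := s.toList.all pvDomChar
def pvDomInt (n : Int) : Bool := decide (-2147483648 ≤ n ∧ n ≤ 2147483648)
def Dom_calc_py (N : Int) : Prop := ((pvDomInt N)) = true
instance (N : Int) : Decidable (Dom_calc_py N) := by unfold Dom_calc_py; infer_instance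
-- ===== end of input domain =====

-- B rewrites A's per-step build/filter/max candidate selection as three explicit
-- phases (×3 while it fits, at most one ×2, then +1 steps): simpler, same greedy path.

-- ===== PORT A =====
-- the while loop of A; the `else` fallbacks are unreachable inside Pre_ (Python
-- returns None when the loop is never entered, raises ValueError on max([]))
def calcLoopA (N _N ops : Int) (track : List String) : Int × List String :=
  if _h : _N ≤ N then
    match PySem.List.max? (([_N * 3, _N * 2, _N + 1]).filter (fun r => decide (r ≤ N))) (fun y => y) with
    | none => (ops, track)                 -- Python: max([]) raises ValueError (unreachable inside Pre_)
    | some res =>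
      if res = N then (ops + 1, track ++ [PySem.Int.toStr res])
      else if _hlt : _N < res then         -- termination guard only; always true inside Pre_
        calcLoopA N res (ops + 1) (track ++ [PySem.Int.toStr res])
      else (ops + 1, track ++ [PySem.Int.toStr res])
  else (ops, track)                        -- Python: falls off the loop, returns None (unreachable inside Pre_)
termination_by (N + 1 - _N).toNat
decreasing_by omega

def calc_py (N : Int) : Int × List String :=
  let track := [PySem.Int.toStr 1]
  if N = 1 then (0, track)
  else calcLoopA N 1 0 track

-- ===== PORT B =====
-- phase 1: while _N * 3 <= N  (the 1 ≤ _N conjunct is a termination guard only;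
-- B always starts at _N = 1 so it is invariantly true)
def calcPhase1 (N _N ops : Int) (track : List String) : Int × Int × List String :=
  if _h : _N * 3 ≤ N ∧ 1 ≤ _N then
    calcPhase1 N (_N * 3) (ops + 1) (track ++ [PySem.Int.toStr (_N * 3)])
  else (_N, ops, track)
termination_by (N + 1 - _N).toNat
decreasing_by omega

-- phase 3: while _N < N
def calcPhase3 (N _N ops : Int) (track : List String) : Int × List String :=
  if _h : _N < N then
    calcPhase3 N (_N + 1) (ops + 1) (track ++ [PySem.Int.toStr (_N + 1)])
  else (ops, track)
termination_by (N - _N).toNat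
decreasing_by omega

def calc_py_alt (N : Int) : Int × List String :=
  let s1 := calcPhase1 N 1 0 [PySem.Int.toStr 1]
  let s2 := if s1.1 * 2 ≤ N then
              (s1.1 * 2, s1.2.1 + 1, s1.2.2 ++ [PySem.Int.toStr (s1.1 * 2)])
            else s1
  calcPhase3 N s2.1 s2.2.1 s2.2.2

-- ===== PRECONDITION & SPEC =====
-- Pre_ excludes N ≤ 0, where Python A falls off its loop and returns None (not an (int, list) value).
def Pre_calc_py (N : Int) : Prop := 1 ≤ N
instance (N : Int) : Decidable (Pre_calc_py N) := by unfold Pre_calc_py; infer_instance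
def pvWitness_calc_py : Int := (7)

def Spec_calc_py (N : Int) (out : Int × List String) : Prop := out = calc_py_alt N
instance (N : Int) (out : Int × List String) : Decidable (Spec_calc_py N out) := by unfold Spec_calc_py; infer_instance

-- ===== CLAIM (what is proved, stated in full; the proofs are below) =====
def Claim_equal_calc_py : Prop := ∀ (N : Int), Dom_calc_py N → Pre_calc_py N → Spec_calc_py N (calc_py N)

-- ===== LEMMAS AND PROOFS =====

-- B's tail (phases 1–3) started from an arbitrary state
def altRest (N _N ops : Int) (track : List String) : Int × List String :=
  let s1 := calcPhase1 N _N ops track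
  let s2 := if s1.1 * 2 ≤ N then
              (s1.1 * 2, s1.2.1 + 1, s1.2.2 ++ [PySem.Int.toStr (s1.1 * 2)])
            else s1
  calcPhase3 N s2.1 s2.2.1 s2.2.2

theorem altRest_noop (N _N ops : Int) (track : List String)
    (h3 : ¬ _N * 3 ≤ N) (h2 : ¬ _N * 2 ≤ N) :
    altRest N _N ops track = calcPhase3 N _N ops track := by
  unfold altRest
  rw [calcPhase1]
  simp only [h3, false_and, dite_false]
  simp [h2]

-- the max of A's filtered candidate list, for 1 ≤ _N < N
theorem maxCand (N _N : Int) (h1 : 1 ≤ _N) (hlt : _N < N) :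
    PySem.List.max? (([_N * 3, _N * 2, _N + 1]).filter (fun r => decide (r ≤ N))) (fun y => y)
      = some (if _N * 3 ≤ N then _N * 3 else if _N * 2 ≤ N then _N * 2 else _N + 1) := by
  have hp1 : _N + 1 ≤ N := hlt
  by_cases h3 : _N * 3 ≤ N
  · have h2 : _N * 2 ≤ N := by omega
    simp [List.filter, h3, h2, hp1, PySem.List.max?_id_cons]
    omega
  · by_cases h2 : _N * 2 ≤ N
    · simp [List.filter, h3, h2, hp1, PySem.List.max?_id_cons]
      omega
    · simp [List.filter, h3, h2, hp1, PySem.List.max?_id_cons]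

theorem loopA_eq_altRest (N : Int) : ∀ (k : Nat) (_N ops : Int) (track : List String),
    (N - _N).toNat = k → 1 ≤ _N → _N < N →
    calcLoopA N _N ops track = altRest N _N ops track := by
  intro k
  induction k using Nat.strong_induction_on with
  | _ k ih =>
    intro _N ops track hk h1 hlt
    have hle : _N ≤ N := le_of_lt hlt
    rw [calcLoopA]
    simp only [hle, dite_true]
    rw [maxCand N _N h1 hlt]
    by_cases h3 : _N * 3 ≤ N
    · -- ×3 step: phase 1 fires on the B side too
      simp only [h3, if_true]
      have hstep : altRest N _N ops track
          = altRest N (_N * 3) (ops + 1) (track ++ [PySem.Int.toStr (_N * 3)]) := by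
        unfold altRest
        rw [calcPhase1]
        simp [h3, h1]
      by_cases heq : _N * 3 = N
      · -- last step: after it all phase conditions fail
        simp only [heq, if_true]
        rw [hstep, heq, altRest_noop _ _ _ _ (by omega) (by omega)]
        rw [calcPhase3]
        simp
      · have hlt' : _N * 3 < N := lt_of_le_of_ne h3 heq
        simp only [heq, if_false]
        have : _N < _N * 3 := by omega
        simp only [this, dite_true]
        rw [hstep]
        exact ih ((N - _N * 3).toNat) (by omega) _ _ _ rfl (by omega) hlt'
    · simp only [h3, if_false]
      by_cases h2 : _N * 2 ≤ N
      · -- single ×2 step on the B side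
        simp only [h2, if_true]
        have hstep : altRest N _N ops track
            = calcPhase3 N (_N * 2) (ops + 1) (track ++ [PySem.Int.toStr (_N * 2)]) := by
          unfold altRest
          rw [calcPhase1]
          simp only [h3, false_and, dite_false]
          simp [h2]
        by_cases heq : _N * 2 = N
        · simp only [heq, if_true]
          rw [hstep, heq, calcPhase3]
          simp
        · have hlt' : _N * 2 < N := lt_of_le_of_ne h2 heq
          simp only [heq, if_false]
          have : _N < _N * 2 := by omega
          simp only [this, dite_true]
          rw [hstep,
            ih ((N - _N * 2).toNat) (by omega) _ _ _ rfl (by omega) hlt',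
            altRest_noop _ _ _ _ (by omega) (by omega)]
      · -- +1 step
        simp only [h2, if_false]
        have hstep : altRest N _N ops track
            = calcPhase3 N (_N + 1) (ops + 1) (track ++ [PySem.Int.toStr (_N + 1)]) := by
          rw [altRest_noop _ _ _ _ h3 h2, calcPhase3]
          simp [hlt]
        by_cases heq : _N + 1 = N
        · simp only [heq, if_true]
          rw [hstep, heq, calcPhase3]
          simp
        · have hlt' : _N + 1 < N := lt_of_le_of_ne hlt heq
          simp only [heq, if_false]
          have : _N < _N + 1 := by omega
          simp only [this, dite_true]
          rw [hstep,
            ih ((N - (_N + 1)).toNat) (by omega) _ _ _ rfl (by omega) hlt',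
            altRest_noop _ _ _ _ (by omega) (by omega)]

-- ===== VERDICT (by name: the statement is the Claim_ definition above) =====
theorem calc_py_spec : Claim_equal_calc_py := by
  intro N _hdom hpre
  unfold Spec_calc_py calc_py
  by_cases h1 : N = 1
  · subst h1
    simp only [if_true]
    unfold calc_py_alt
    rw [calcPhase1]
    norm_num
    rw [calcPhase3]
    norm_num
  · have hlt : (1 : Int) < N := by
      have : (1 : Int) ≤ N := hpre
      omega
    simp only [h1, if_false]
    rw [loopA_eq_altRest N ((N - 1).toNat) 1 0 _ rfl (by omega) hlt]
    rfl
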